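-- pv_equiv track=rewrite | github.com/vtocaciu/advent-of-code-2025 | 1/solution_part_two.py | click
-- ===== SOURCE A (Python) =====
-- def click(current_value, max_value, clicks, direction):
--     zero_clicked = 0
--     for _ in range(clicks):
--         current_value = current_value + direction
--         if current_value == max_value:
--             current_value = 0
--         if current_value == -1:
--             current_value = max_value - 1
--         if current_value == 0:
--             zero_clicked = zero_clicked + 1
--     return current_value, zero_clicked
-- ===== SOURCE B (Python) =====
-- def click(current_value, max_value, clicks, direction):
--     # The state is the single integer value, so the walk is eventually periodic as
--     # soon as a value repeats.  A repeat can only happen through a wrap (the value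
--     # becomes 0 or max_value - 1) or a fixed point, so remembering the first click
--     # at which each wrap result appeared is enough to detect the cycle, after which
--     # the remaining clicks are skipped with one divmod jump plus a short replay.
--     def step(v):
--         v = v + direction
--         if v == max_value:
--             return 0, True
--         if v == -1:
--             return max_value - 1, True
--         return v, False
--
--     v, zeros, i = current_value, 0, 0
--     first = {}  # wrap result -> (click index, zero count there)
--     while i < clicks:
--         w, wrapped = step(v)
--         i += 1
--         nz = zeros + (1 if w == 0 else 0)
--         if w == v:
--             j, zj = i - 1, zeros
--         elif wrapped and w in first:
--             j, zj = first[w]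
--         else:
--             if wrapped:
--                 first[w] = (i, nz)
--             v, zeros = w, nz
--             continue
--         full, extra = divmod(clicks - i, i - j)
--         zeros = nz + full * (nz - zj)
--         for _ in range(extra):
--             w, _ = step(w)
--             zeros += 1 if w == 0 else 0
--         return w, zeros
--     return v, zeros
-- ===== Notes on version B (the rewrite author's own statement) =====
-- stated objective: alternative
-- what changed: A blindly simulates every click; B exploits that the single-integer state makes the walk eventually periodic and that a repeat can only arise from a wrap result (0 or max_value-1) or a fixed point: it remembers the first click index of each wrap result and, once a state recurs, replaces all remaining clicks by one divmod jump over the detected cycle plus a short replay.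
import Mathlib
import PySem

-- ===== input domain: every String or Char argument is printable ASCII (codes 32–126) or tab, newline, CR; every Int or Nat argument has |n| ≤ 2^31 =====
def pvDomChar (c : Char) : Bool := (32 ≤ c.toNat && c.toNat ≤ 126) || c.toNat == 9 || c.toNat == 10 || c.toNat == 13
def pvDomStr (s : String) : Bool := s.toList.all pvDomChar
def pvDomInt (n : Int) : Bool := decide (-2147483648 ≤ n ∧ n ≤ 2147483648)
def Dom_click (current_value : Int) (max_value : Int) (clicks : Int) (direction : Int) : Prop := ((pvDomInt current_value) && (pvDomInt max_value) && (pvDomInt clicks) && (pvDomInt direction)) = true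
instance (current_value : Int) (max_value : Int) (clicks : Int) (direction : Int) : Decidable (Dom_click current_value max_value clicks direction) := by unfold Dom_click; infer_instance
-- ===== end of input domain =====

-- B replaces A's click-by-click simulation by cycle detection on the wrap events: once a
-- value recurs, the remaining clicks are handled by one divmod jump over the cycle plus a
-- short replay (a genuinely different algorithm of the same worst-case cost).

-- ===== PORT A =====
-- one iteration of A's for-loop body, on the state (current_value, zero_clicked)
def clickStep (max_value : Int) (direction : Int) (st : Int × Int) : Int × Int :=
  let v1 := st.1 + direction
  let v2 := if v1 = max_value then 0 else v1
  let v3 := if v2 = -1 then max_value - 1 else v2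
  (v3, if v3 = 0 then st.2 + 1 else st.2)

def click (current_value : Int) (max_value : Int) (clicks : Int) (direction : Int) : Int × Int :=
  (PySem.List.pyRange 0 clicks 1).foldl (fun st _ => clickStep max_value direction st)
    (current_value, 0)

-- ===== PORT B =====
-- Source B's inner helper `step`
def stepB (max_value direction v : Int) : Int × Bool :=
  let v1 := v + direction
  if v1 = max_value then (0, true)
  else if v1 = -1 then (max_value - 1, true)
  else (v1, false)

-- Source B's trailing `for _ in range(extra)` replay loop, on the state (w, zeros)
def replayB (max_value direction : Int) : Nat → Int → Int → Int × Int
  | 0, w, z => (w, z)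
  | k + 1, w, z =>
    let s := stepB max_value direction w
    replayB max_value direction k s.1 (z + if s.1 = 0 then 1 else 0)

-- Source B's while loop
def clickLoopB (max_value direction clicks v zeros i : Int)
    (first : PySem.Dict Int (Int × Int)) : Int × Int :=
  if _h : i < clicks then
    let s := stepB max_value direction v
    let w := s.1
    let i' := i + 1
    let nz := zeros + (if w = 0 then 1 else 0)
    let cyc : Option (Int × Int) :=
      if w = v then some (i' - 1, zeros)
      else if s.2 = true then first.get? w else none
    match cyc with
    | some (j, zj) =>
      let full := PySem.Int.floordiv (clicks - i') (i' - j)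
      let extra := PySem.Int.mod (clicks - i') (i' - j)
      replayB max_value direction extra.toNat w (nz + full * (nz - zj))
    | none =>
      clickLoopB max_value direction clicks w nz i'
        (if s.2 = true then first.insert w (i', nz) else first)
  else (v, zeros)
termination_by (clicks - i).toNat
decreasing_by omega

def click_alt (current_value : Int) (max_value : Int) (clicks : Int) (direction : Int) :
    Int × Int :=
  clickLoopB max_value direction clicks current_value 0 0 PySem.Dict.empty

-- ===== PRECONDITION & SPEC =====
def Spec_click (current_value : Int) (max_value : Int) (clicks : Int) (direction : Int) (out : Int × Int) : Prop := out = click_alt current_value max_value clicks direction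
instance (current_value : Int) (max_value : Int) (clicks : Int) (direction : Int) (out : Int × Int) : Decidable (Spec_click current_value max_value clicks direction out) := by unfold Spec_click; infer_instance

-- ===== CLAIM (what is proved, stated in full; the proofs are below) =====
def Claim_equal_click : Prop := ∀ (current_value : Int) (max_value : Int) (clicks : Int) (direction : Int), Dom_click current_value max_value clicks direction → Spec_click current_value max_value clicks direction (click current_value max_value clicks direction)

-- ===== LEMMAS AND PROOFS =====

-- folding a constant-element function is function iteration
theorem foldl_const_iterate {α β : Type} (l : List α) (f : β → β) (init : β) :
    l.foldl (fun st _ => f st) init = f^[l.length] init := by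
  induction l generalizing init with
  | nil => rfl
  | cons x xs ih => simp [List.foldl_cons, ih, Function.iterate_succ_apply]

theorem click_eq_iterate (cv m clicks d : Int) :
    click cv m clicks d = (clickStep m d)^[clicks.toNat] (cv, 0) := by
  unfold click
  rw [foldl_const_iterate, PySem.List.length_pyRange_one]
  norm_num

-- A's value and zero-count after k clicks
def sval (m d cv : Int) (k : Nat) : Int := ((clickStep m d)^[k] (cv, 0)).1
def szer (m d cv : Int) (k : Nat) : Int := ((clickStep m d)^[k] (cv, 0)).2

theorem step_shift (m d v z : Int) :
    clickStep m d (v, z) = ((clickStep m d (v, 0)).1, z + (clickStep m d (v, 0)).2) := by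
  simp only [clickStep]
  split_ifs <;> simp

theorem iter_pair (m d cv : Int) (k : Nat) :
    (clickStep m d)^[k] (cv, 0) = (sval m d cv k, szer m d cv k) := rfl

theorem sval_succ (m d cv : Int) (k : Nat) :
    sval m d cv (k + 1) = (clickStep m d (sval m d cv k, 0)).1 := by
  unfold sval
  rw [Function.iterate_succ_apply', iter_pair, step_shift]

theorem szer_succ (m d cv : Int) (k : Nat) :
    szer m d cv (k + 1) = szer m d cv k + (if sval m d cv (k + 1) = 0 then 1 else 0) := by
  unfold szer
  rw [Function.iterate_succ_apply', iter_pair, step_shift m d (sval m d cv k) (szer m d cv k)]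
  rw [sval_succ]
  have : (clickStep m d (sval m d cv k, 0)).2 =
      (if (clickStep m d (sval m d cv k, 0)).1 = 0 then (1 : Int) else 0) := by
    simp only [clickStep]
    split_ifs <;> simp
  rw [this]

-- once a value repeats, the trajectory is periodic from there on
theorem val_per (m d cv : Int) (j p : Nat) (hper : sval m d cv (j + p) = sval m d cv j) :
    ∀ t : Nat, sval m d cv (j + t + p) = sval m d cv (j + t) := by
  intro t
  induction t with
  | zero => simpa using hper
  | succ t ih =>
    have h1 : j + (t + 1) + p = (j + t + p) + 1 := by omega
    have h2 : j + (t + 1) = (j + t) + 1 := rfl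
    rw [h1, h2, sval_succ, sval_succ, ih]

theorem zer_per (m d cv : Int) (j p : Nat) (hper : sval m d cv (j + p) = sval m d cv j) :
    ∀ t : Nat, szer m d cv (j + t + p) =
      szer m d cv (j + t) + (szer m d cv (j + p) - szer m d cv j) := by
  intro t
  induction t with
  | zero => simp
  | succ t ih =>
    have h1 : j + (t + 1) + p = (j + t + p) + 1 := by omega
    have h2 : j + (t + 1) = (j + t) + 1 := by omega
    rw [h1, szer_succ, ih, h2, szer_succ]
    have h3 : (j + t + p) + 1 = j + (t + 1) + p := by omega
    have h4 : sval m d cv (j + (t + 1) + p) = sval m d cv (j + (t + 1)) :=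
      val_per m d cv j p hper (t + 1)
    rw [h3, h4]
    ring_nf

theorem val_mult (m d cv : Int) (j p : Nat) (hper : sval m d cv (j + p) = sval m d cv j)
    (q t : Nat) : sval m d cv (j + t + q * p) = sval m d cv (j + t) := by
  induction q with
  | zero => simp
  | succ q ih =>
    have h1 : j + t + (q + 1) * p = (j + (t + q * p)) + p := by ring
    rw [h1]
    have := val_per m d cv j p hper (t + q * p)
    rw [show j + (t + q * p) + p = j + (t + q * p) + p from rfl] at this ⊢
    rw [this]
    have h2 : j + (t + q * p) = j + t + q * p := by omega
    rw [h2, ih]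

theorem zer_mult (m d cv : Int) (j p : Nat) (hper : sval m d cv (j + p) = sval m d cv j)
    (q t : Nat) : szer m d cv (j + t + q * p) =
      szer m d cv (j + t) + (q : Int) * (szer m d cv (j + p) - szer m d cv j) := by
  induction q with
  | zero => simp
  | succ q ih =>
    have h1 : j + t + (q + 1) * p = (j + (t + q * p)) + p := by ring
    rw [h1]
    have := zer_per m d cv j p hper (t + q * p)
    rw [this]
    have h2 : j + (t + q * p) = j + t + q * p := by omega
    rw [h2, ih]
    push_cast
    ring

theorem stepB_val (m d v z : Int) :
    clickStep m d (v, z) =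
      ((stepB m d v).1, z + (if (stepB m d v).1 = 0 then 1 else 0)) := by
  simp only [clickStep, stepB]
  split_ifs <;> refine Prod.ext ?_ ?_ <;> simp_all

theorem sval_stepB (m d cv : Int) (k : Nat) :
    sval m d cv (k + 1) = (stepB m d (sval m d cv k)).1 := by
  rw [sval_succ, stepB_val]

theorem replayB_eq (m d cv : Int) : ∀ (k t : Nat) (z : Int),
    replayB m d k (sval m d cv t) z =
      (sval m d cv (t + k), z + (szer m d cv (t + k) - szer m d cv t)) := by
  intro k
  induction k with
  | zero => intro t z; simp [replayB]
  | succ k ih =>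
    intro t z
    simp only [replayB]
    rw [← sval_stepB]
    have hind : (if sval m d cv (t + 1) = 0 then (1 : Int) else 0) =
        szer m d cv (t + 1) - szer m d cv t := by
      rw [szer_succ]
      ring
    rw [hind, ih (t + 1)]
    refine Prod.ext ?_ ?_
    · show sval m d cv (t + 1 + k) = sval m d cv (t + (k + 1))
      congr 1
      omega
    · show z + (szer m d cv (t + 1) - szer m d cv t) +
          (szer m d cv (t + 1 + k) - szer m d cv (t + 1)) = _
      rw [show t + 1 + k = t + (k + 1) from by omega]
      ring

-- skipping full cycles with one divmod plus a short replay lands exactly on A's state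
theorem jump_eq (m d cv clicks i j zj : Int) (h0 : 0 ≤ i) (hil : i < clicks)
    (hj0 : 0 ≤ j) (hji : j ≤ i)
    (hjv : sval m d cv j.toNat = sval m d cv (i.toNat + 1))
    (hzj : zj = szer m d cv j.toNat) :
    replayB m d (PySem.Int.mod (clicks - (i + 1)) (i + 1 - j)).toNat
        (sval m d cv (i.toNat + 1))
        (szer m d cv (i.toNat + 1) +
          PySem.Int.floordiv (clicks - (i + 1)) (i + 1 - j) *
            (szer m d cv (i.toNat + 1) - zj)) =
      (sval m d cv clicks.toNat, szer m d cv clicks.toNat) := by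
  set nj : Nat := j.toNat with hnj
  set p : Nat := i.toNat + 1 - nj with hp
  set remN : Nat := (clicks - (i + 1)).toNat with hremN
  set e : Nat := remN % p with he
  set f : Nat := remN / p with hf
  have hp1 : 1 ≤ p := by omega
  have hper : sval m d cv (nj + p) = sval m d cv nj := by
    rw [show nj + p = i.toNat + 1 from by omega]
    exact hjv.symm
  have hpInt : i + 1 - j = (p : Int) := by omega
  have hremInt : clicks - (i + 1) = (remN : Int) := by omega
  have hfull : PySem.Int.floordiv (clicks - (i + 1)) (i + 1 - j) = (f : Int) := by
    rw [hpInt, hremInt, PySem.Int.floordiv_eq_ediv_of_pos (by omega : (0 : Int) < (p : Int))]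
    rw [hf]
    exact (Int.natCast_div remN p).symm
  have hextra : PySem.Int.mod (clicks - (i + 1)) (i + 1 - j) = (e : Int) := by
    rw [hpInt, hremInt, PySem.Int.mod_eq_emod_of_pos (by omega : (0 : Int) < (p : Int))]
    rw [he]
    push_cast
    ring
  have hex_lt : e < p := Nat.mod_lt _ (by omega)
  rw [hfull, hextra, hzj, Int.toNat_natCast]
  rw [show i.toNat + 1 = nj + p from by omega]
  rw [replayB_eq m d cv e (nj + p)]
  have hclk : clicks.toNat = nj + e + (f + 1) * p := by
    have h1 : remN = f * p + e := by
      rw [hf, he]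
      exact (Nat.div_add_mod' remN p).symm
    have h2 : (f + 1) * p = f * p + p := by ring
    omega
  rw [hclk, val_mult m d cv nj p hper (f + 1) e, zer_mult m d cv nj p hper (f + 1) e]
  rw [show nj + p + e = nj + e + p from by omega]
  rw [val_per m d cv nj p hper e, zer_per m d cv nj p hper e]
  refine Prod.ext rfl ?_
  dsimp only
  push_cast
  ring

theorem loopB_eq (m d cv clicks : Int) : ∀ (fuel : Nat) (i zeros : Int)
    (first : PySem.Dict Int (Int × Int)),
    (clicks - i).toNat = fuel → 0 ≤ i → (i ≤ clicks ∨ i = 0) →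
    zeros = szer m d cv i.toNat →
    (∀ w j zj, first.get? w = some (j, zj) →
      0 ≤ j ∧ j ≤ i ∧ sval m d cv j.toNat = w ∧ zj = szer m d cv j.toNat) →
    clickLoopB m d clicks (sval m d cv i.toNat) zeros i first =
      (sval m d cv clicks.toNat, szer m d cv clicks.toNat) := by
  intro fuel
  induction fuel using Nat.strong_induction_on with
  | _ fuel ih =>
    intro i zeros first hfuel h0 hic hz hfst
    unfold clickLoopB
    by_cases hil : i < clicks
    · rw [dif_pos hil]
      dsimp only
      rw [← sval_stepB m d cv i.toNat]
      subst hz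
      rw [show szer m d cv i.toNat + (if sval m d cv (i.toNat + 1) = 0 then (1 : Int) else 0)
          = szer m d cv (i.toNat + 1) from (szer_succ m d cv i.toNat).symm]
      by_cases hwv : sval m d cv (i.toNat + 1) = sval m d cv i.toNat
      · rw [if_pos hwv]
        dsimp only
        rw [show i + 1 - 1 = i from by ring]
        exact jump_eq m d cv clicks i i (szer m d cv i.toNat) h0 hil h0 le_rfl
          hwv.symm rfl
      · rw [if_neg hwv]
        rcases hb : (stepB m d (sval m d cv i.toNat)).2 with _ | _
        · -- no wrap: plain advance
          have hrec := ih ((clicks - (i + 1)).toNat) (by omega) (i + 1)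
            (szer m d cv (i.toNat + 1)) first rfl (by omega) (by omega)
            (by rw [show (i + 1).toNat = i.toNat + 1 from by omega])
            (by
              intro w j zj hget
              obtain ⟨ha, hbb, hc, hdd⟩ := hfst w j zj hget
              exact ⟨ha, by omega, hc, hdd⟩)
          rw [show (i + 1).toNat = i.toNat + 1 from by omega] at hrec
          exact hrec
        · -- wrap: consult / extend the table of first wrap results
          rcases hfg : first.get? (sval m d cv (i.toNat + 1)) with _ | ⟨j, zj⟩
          · have hrec := ih ((clicks - (i + 1)).toNat) (by omega) (i + 1)
              (szer m d cv (i.toNat + 1))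
              (first.insert (sval m d cv (i.toNat + 1)) (i + 1, szer m d cv (i.toNat + 1)))
              rfl (by omega) (by omega)
              (by rw [show (i + 1).toNat = i.toNat + 1 from by omega])
              (by
                intro w j zj hget
                rw [PySem.Dict.get?_insert] at hget
                by_cases hu : w = sval m d cv (i.toNat + 1)
                · rw [if_pos hu] at hget
                  have hjj : j = i + 1 ∧ zj = szer m d cv (i.toNat + 1) := by
                    injection hget with h2
                    have h3 := Prod.ext_iff.mp h2
                    exact ⟨h3.1.symm, h3.2.symm⟩
                  obtain ⟨hj1, hz1⟩ := hjj
                  subst hj1 hz1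
                  refine ⟨by omega, le_rfl, ?_, ?_⟩ <;>
                    rw [show (i + 1).toNat = i.toNat + 1 from by omega]
                  · exact hu.symm
                · rw [if_neg hu] at hget
                  obtain ⟨ha, hbb, hc, hdd⟩ := hfst w j zj hget
                  exact ⟨ha, by omega, hc, hdd⟩)
            rw [show (i + 1).toNat = i.toNat + 1 from by omega] at hrec
            exact hrec
          · obtain ⟨hj0, hji, hjv, hzj⟩ := hfst _ _ _ hfg
            exact jump_eq m d cv clicks i j zj h0 hil hj0 hji hjv hzj
    · rw [dif_neg hil]
      have hieq : i.toNat = clicks.toNat := by omega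
      rw [hz, hieq]

-- ===== VERDICT (by name: the statement is the Claim_ definition above) =====
theorem click_spec : Claim_equal_click := by
  intro cv m cl d _
  unfold Spec_click click_alt
  rw [click_eq_iterate, iter_pair]
  have h := loopB_eq m d cv cl ((cl - 0).toNat) 0 0 PySem.Dict.empty rfl le_rfl
    (by omega) rfl
    (by
      intro w j zj hget
      rw [PySem.Dict.get?_empty] at hget
      exact absurd hget (by simp))
  exact h.symm
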